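-- pv_equiv track=rewrite | github.com/lakhtanov/RandomTextGeneration | convert_html_to_text.py | contains_bad_sentence_begin
-- ===== SOURCE A (Python) =====
-- def contains_bad_sentence_begin(line):
--     start = 0
--     while True:
--         start = line.find('.', start)
--         if start == -1:
--             return False
--
--         if start + 1 < len(line) and line[start + 1].islower():
--             return True
--
--         start += 1
-- ===== SOURCE B (Python) =====
-- def contains_bad_sentence_begin(line):
--     return any(a == '.' and b.islower() for a, b in zip(line, line[1:]))
-- ===== Notes on version B (the rewrite author's own statement) =====
-- stated objective: idiomatic
-- what changed: Replaces the stateful while-loop that repeatedly calls line.find with a restart index by a single any() over adjacent character pairs zip(line, line[1:]).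
import Mathlib
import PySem

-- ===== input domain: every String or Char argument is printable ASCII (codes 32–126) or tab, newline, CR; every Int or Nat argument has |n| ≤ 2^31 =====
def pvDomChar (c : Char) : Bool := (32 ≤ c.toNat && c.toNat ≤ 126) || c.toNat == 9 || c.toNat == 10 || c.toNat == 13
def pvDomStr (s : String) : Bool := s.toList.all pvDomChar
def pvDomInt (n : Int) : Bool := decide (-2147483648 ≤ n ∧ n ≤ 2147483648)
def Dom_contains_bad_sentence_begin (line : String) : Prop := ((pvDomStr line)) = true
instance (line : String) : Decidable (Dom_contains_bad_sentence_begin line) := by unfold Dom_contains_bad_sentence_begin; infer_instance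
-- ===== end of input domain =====

-- B replaces A's stateful find('.', start) while-loop by a single any() over adjacent character pairs (idiomatic; same cost).

-- lemma cited by the port's decreasing_by: find from a start past the end yields -1
theorem pvFindFrom_gt_len (s sub : List Char) (k : Nat) (h : s.length < k) :
    PySem.Chars.findFrom s sub (k : Int) none = -1 := by
  simp only [PySem.Chars.findFrom]
  have h1 : ¬ ((k : Int) < 0) := by omega
  simp only [h1, if_false]
  rw [if_pos (by exact_mod_cast h)]

-- ===== PORT A =====
-- A's while-loop: start = line.find('.', start); -1 → False; lowercase after the dot → True; else start += 1
def pvLoopA (s : List Char) (start : Nat) : Bool :=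
  let f := PySem.Chars.findFrom s ['.'] (start : Int) none
  if hf : f = -1 then false
  else
    let j := f.toNat
    if j + 1 < s.length && PySem.Chars.islower (s.getD (j + 1) ' ') then true
    else pvLoopA s (j + 1)
termination_by s.length + 1 - start
decreasing_by
  have hle : start ≤ s.length := by
    by_contra h
    exact hf (pvFindFrom_gt_len s ['.'] start (by omega))
  obtain ⟨h1, h2, _⟩ := PySem.Chars.findFrom_natCast_spec s ['.'] start hle hf
  have hj : (PySem.Chars.findFrom s ['.'] (start : Int) none).toNat < s.length := by
    rcases h2 with ⟨t, ht⟩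
    have := congrArg List.length ht
    simp at this
    omega
  omega

def contains_bad_sentence_begin (line : String) : Bool := pvLoopA line.toList 0

-- ===== PORT B =====
-- any(a == '.' and b.islower() for a, b in zip(line, line[1:]))
def contains_bad_sentence_begin_alt (line : String) : Bool :=
  (line.toList.zip line.toList.tail).any (fun p => p.1 == '.' && PySem.Chars.islower p.2)

-- ===== PRECONDITION & SPEC =====
def Spec_contains_bad_sentence_begin (line : String) (out : Bool) : Prop := out = contains_bad_sentence_begin_alt line
instance (line : String) (out : Bool) : Decidable (Spec_contains_bad_sentence_begin line out) := by unfold Spec_contains_bad_sentence_begin; infer_instance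

-- ===== CLAIM (what is proved, stated in full; the proofs are below) =====
def Claim_equal_contains_bad_sentence_begin : Prop := ∀ (line : String), Dom_contains_bad_sentence_begin line → Spec_contains_bad_sentence_begin line (contains_bad_sentence_begin line)

-- ===== LEMMAS AND PROOFS =====

-- the pair scan on a list of characters (B's core, on the list side)
def pvP (s : List Char) : Bool :=
  (s.zip s.tail).any (fun p => p.1 == '.' && PySem.Chars.islower p.2)

theorem pvP_cons_cons (a b : Char) (r : List Char) :
    pvP (a :: b :: r) = ((a == '.' && PySem.Chars.islower b) || pvP (b :: r)) := by
  simp [pvP]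

theorem pvP_cons_ne (a : Char) (t : List Char) (h : a ≠ '.') : pvP (a :: t) = pvP t := by
  cases t with
  | nil => simp [pvP]
  | cons b r => simp [pvP_cons_cons, h]

theorem pvP_noDot (t : List Char) (h : '.' ∉ t) : pvP t = false := by
  induction t with
  | nil => rfl
  | cons a r ih =>
      simp only [List.mem_cons, not_or] at h
      rw [pvP_cons_ne a r (Ne.symm h.1)]
      exact ih h.2

theorem pvInfix_singleton (c : Char) (t : List Char) : [c] <:+: t ↔ c ∈ t := by
  constructor
  · rintro ⟨l, r, rfl⟩; simp
  · intro h
    obtain ⟨l, r, rfl⟩ := List.append_of_mem h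
    exact ⟨l, r, by simp⟩

theorem pvDrop_cons (s : List Char) (i : Nat) (h : i < s.length) :
    s.drop i = s[i] :: s.drop (i + 1) := (List.getElem_cons_drop h).symm

theorem pvP_skip (s : List Char) (k start j : Nat) (hk : j - start ≤ k) (h1 : start ≤ j) (h2 : j ≤ s.length)
    (h3 : ∀ i, start ≤ i → i < j → ¬ ['.'] <+: s.drop i) :
    pvP (s.drop start) = pvP (s.drop j) := by
  induction k generalizing start with
  | zero =>
      have : start = j := by omega
      rw [this]
  | succ n ih =>
      by_cases he : start = j
      · rw [he]
      · have hlt : start < j := by omega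
        have hsl : start < s.length := by omega
        rw [pvDrop_cons s start hsl]
        have hne : s[start] ≠ '.' := by
          intro hc
          exact h3 start le_rfl hlt ⟨s.drop (start + 1), by rw [← hc]; exact (pvDrop_cons s start hsl).symm⟩
        rw [pvP_cons_ne _ _ hne]
        exact ih (start + 1) (by omega) (by omega) (fun i hi hij => h3 i (by omega) hij)

theorem pvMain (d : Nat) : ∀ (s : List Char) (start : Nat), s.length - start ≤ d → start ≤ s.length →
    pvLoopA s start = pvP (s.drop start) := by
  induction d with
  | zero =>
      intro s start hd hle
      have hstart : start = s.length := by omega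
      subst hstart
      have hf : PySem.Chars.findFrom s ['.'] (s.length : Int) none = -1 := by
        rw [PySem.Chars.findFrom_natCast_eq_neg_one_iff s ['.'] s.length le_rfl]
        simp
      rw [pvLoopA]
      simp [hf, pvP]
  | succ n ih =>
      intro s start hd hle
      rw [pvLoopA]
      by_cases hf : PySem.Chars.findFrom s ['.'] (start : Int) none = -1
      · have hmem : '.' ∉ s.drop start := by
          rw [← pvInfix_singleton]
          exact (PySem.Chars.findFrom_natCast_eq_neg_one_iff s ['.'] start hle).mp hf
        simp [hf, pvP_noDot _ hmem]
      · obtain ⟨h1, h2, h3⟩ := PySem.Chars.findFrom_natCast_spec s ['.'] start hle hf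
        set j := (PySem.Chars.findFrom s ['.'] (start : Int) none).toNat with hjdef
        have hjl : j < s.length := by
          rcases h2 with ⟨t, ht⟩
          have := congrArg List.length ht
          simp at this; omega
        have hsj : s[j] = '.' := by
          rcases h2 with ⟨t, ht⟩
          have := pvDrop_cons s j hjl
          rw [this] at ht
          exact ((List.cons.injEq _ _ _ _).mp ht).1.symm
        have hstj : start ≤ j := by
          have : (start : Int) ≤ (PySem.Chars.findFrom s ['.'] (start : Int) none) := h1
          omega
        have hskip : pvP (s.drop start) = pvP (s.drop j) :=
          pvP_skip s (j - start) start j (by omega) hstj (by omega) h3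
        rw [hskip]
        rw [dif_neg hf]
        by_cases hc : j + 1 < s.length && PySem.Chars.islower (s.getD (j + 1) ' ')
        · -- lowercase right after the dot: both sides true
          simp only [hc, if_true]
          have hlt : j + 1 < s.length := by
            rcases Bool.and_eq_true_iff.mp hc with ⟨ha, _⟩
            simpa using ha
          have hl : PySem.Chars.islower s[j + 1] = true := by
            rcases Bool.and_eq_true_iff.mp hc with ⟨_, hb⟩
            rwa [List.getD_eq_getElem s ' ' hlt] at hb
          rw [pvDrop_cons s j hjl, pvDrop_cons s (j + 1) hlt, hsj, pvP_cons_cons]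
          simp [hl]
        · rw [if_neg hc]
          have hrec : pvLoopA s (j + 1) = pvP (s.drop (j + 1)) :=
            ih s (j + 1) (by omega) (by omega)
          rw [hrec]
          by_cases hlt : j + 1 < s.length
          · have hl : PySem.Chars.islower s[j + 1] = false := by
              rw [Bool.not_eq_true, Bool.and_eq_false_iff] at hc
              rcases hc with ha | hb
              · exact absurd hlt (by simpa using ha)
              · rwa [List.getD_eq_getElem s ' ' hlt] at hb
            rw [pvDrop_cons s j hjl, pvDrop_cons s (j + 1) hlt, hsj, pvP_cons_cons]
            simp [hl]
          · have hj1 : j + 1 = s.length := by omega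
            rw [pvDrop_cons s j hjl]
            have : s.drop (j + 1) = [] := List.drop_eq_nil_of_le (by omega)
            rw [this]
            simp [pvP]

-- ===== VERDICT (by name: the statement is the Claim_ definition above) =====
theorem contains_bad_sentence_begin_spec : Claim_equal_contains_bad_sentence_begin := by
  intro line _
  unfold Spec_contains_bad_sentence_begin contains_bad_sentence_begin contains_bad_sentence_begin_alt
  have := pvMain line.toList.length line.toList 0 (by omega) (by omega)
  simpa [pvP] using this
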